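-- pv_equiv track=rewrite | github.com/shinkeonkim/boj-solution-archiving-site | data/source/15612_74295438.py | f
-- ===== SOURCE A (Python) =====
-- def f(n):
--   l = []
--
--   if n == 0:
--     return 0
--
--   while n > 0:
--     l.append(n % 3)
--     n //= 3
--
--   return "".join([*map(str, l[::-1])])
-- ===== SOURCE B (Python) =====
-- def f(n):
--     if n == 0:
--         return 0
--
--     def go(m):
--         if m <= 0:
--             return ""
--         return go(m // 3) + str(m % 3)
--
--     return go(n)
-- ===== Notes on version B (the rewrite author's own statement) =====
-- stated objective: simpler
-- what changed: Replaces the while loop that appends digits to a list and then reverses and joins it with a recursive helper that builds the base-3 string directly on unwinding of the call stack.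
-- outside the precondition, e.g. on f(0): A returns 0, B returns 0
import Mathlib
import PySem

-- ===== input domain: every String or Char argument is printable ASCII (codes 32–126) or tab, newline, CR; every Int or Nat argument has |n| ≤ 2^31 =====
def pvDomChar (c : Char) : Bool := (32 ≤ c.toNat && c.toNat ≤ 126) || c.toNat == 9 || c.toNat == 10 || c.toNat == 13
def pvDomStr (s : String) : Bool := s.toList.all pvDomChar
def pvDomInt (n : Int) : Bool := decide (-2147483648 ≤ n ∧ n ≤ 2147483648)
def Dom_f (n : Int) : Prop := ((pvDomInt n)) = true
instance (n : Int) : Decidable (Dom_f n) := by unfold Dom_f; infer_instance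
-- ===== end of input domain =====

-- B builds the base-3 string by recursion, concatenating digits while unwinding,
-- instead of appending digits to a list and then reversing and joining it.

-- ===== PORT A =====
-- the while loop: l.append(n % 3); n //= 3, while n > 0
def fLoop (n : Int) (l : List Int) : List Int :=
  if n > 0 then fLoop (PySem.Int.floordiv n 3) (l ++ [PySem.Int.mod n 3]) else l
termination_by n.toNat
decreasing_by
  rename_i h
  rw [PySem.Int.floordiv_eq_ediv_of_pos (by omega : (0:Int) < 3)]
  omega

def f (n : Int) : String :=
  -- the Python returns the int 0 when n == 0 — not a string; that input is outside Pre_f,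
  -- and the port returns "" there.
  if n = 0 then ""
  else PySem.Str.join ""
         (((PySem.List.slice? (fLoop n []) none none (-1)).getD []).map PySem.Int.toStr)

-- ===== PORT B =====
-- go(m): "" if m <= 0 else go(m // 3) + str(m % 3)   (string concatenation over code points)
def fGo (m : Int) : List Char :=
  if m ≤ 0 then []
  else fGo (PySem.Int.floordiv m 3) ++ PySem.Int.toChars (PySem.Int.mod m 3)
termination_by m.toNat
decreasing_by
  rename_i h
  rw [PySem.Int.floordiv_eq_ediv_of_pos (by omega : (0:Int) < 3)]
  omega

def f_alt (n : Int) : String :=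
  if n = 0 then "" else String.ofList (fGo n)

-- ===== PRECONDITION & SPEC =====
-- Pre_f excludes only n = 0, where the Python A returns the int 0 — not a value of the declared String type.
def Pre_f (n : Int) : Prop := n ≠ 0
instance (n : Int) : Decidable (Pre_f n) := by unfold Pre_f; infer_instance
def pvWitness_f : Int := (5)

def Spec_f (n : Int) (out : String) : Prop := out = f_alt n
instance (n : Int) (out : String) : Decidable (Spec_f n out) := by unfold Spec_f; infer_instance

-- ===== CLAIM (what is proved, stated in full; the proofs are below) =====
def Claim_equal_f : Prop := ∀ (n : Int), Dom_f n → Pre_f n → Spec_f n (f n)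

-- ===== LEMMAS AND PROOFS =====

theorem join_nil_cons (x : List Char) (xs : List (List Char)) :
    PySem.Chars.join [] (x :: xs) = x ++ PySem.Chars.join [] xs := by
  cases xs with
  | nil => simp [PySem.Chars.join, List.intercalate]
  | cons y ys => simp [PySem.Chars.join, List.intercalate, List.intersperse]

-- loop invariant: rendering the reversed digit list of the loop equals fGo n
-- followed by the rendering of the reversed accumulator
theorem fLoop_render (k : Nat) : ∀ (n : Int), n.toNat ≤ k → ∀ (l : List Int),
    PySem.Chars.join [] (((fLoop n l).reverse).map PySem.Int.toChars)
      = fGo n ++ PySem.Chars.join [] ((l.reverse).map PySem.Int.toChars) := by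
  induction k with
  | zero =>
    intro n hn l
    have hle : n ≤ 0 := by omega
    rw [fLoop, fGo, if_neg (by omega : ¬ n > 0), if_pos hle]
    simp
  | succ k ih =>
    intro n hn l
    by_cases h : n > 0
    · have hdiv : (PySem.Int.floordiv n 3).toNat ≤ k := by
        rw [PySem.Int.floordiv_eq_ediv_of_pos (by omega : (0:Int) < 3)]
        omega
      rw [fLoop, if_pos h, ih _ hdiv]
      conv_rhs => rw [fGo, if_neg (by omega : ¬ n ≤ 0)]
      simp [join_nil_cons, List.append_assoc]
    · rw [fLoop, fGo, if_neg h, if_pos (by omega : n ≤ 0)]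
      simp

-- ===== VERDICT (by name: the statement is the Claim_ definition above) =====
theorem f_spec : Claim_equal_f := by
  intro n _ hpre
  unfold Spec_f f f_alt
  rw [if_neg hpre, if_neg hpre]
  apply String.toList_inj.mp
  rw [PySem.Str.toList_join, PySem.List.slice?_none_none_neg_one]
  simp only [Option.getD_some, List.map_map]
  have hfun : (String.toList ∘ PySem.Int.toStr) = PySem.Int.toChars :=
    funext PySem.Int.toList_toStr
  rw [hfun]
  have h := fLoop_render n.toNat n (le_refl _) []
  simp only [List.reverse_nil, List.map_nil, PySem.Chars.join_nil, List.append_nil] at h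
  simpa using h
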